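-- pv_equiv track=rewrite | github.com/gokulgk-9402/Daily-CP-October-2022 | StringCompressionII.py | getLengthOfOptimalCompression
-- ===== SOURCE A (Python) =====
-- def getLengthOfOptimalCompression(s: str, k: int) -> int:
--
--     def helper(index, res_k, carry = 0):
--
--         if carry == 0 and mem[index][res_k] != -1:
--             return mem[index][res_k]
--
--         curr = carry + frequency[index]
--         minimum = 1 + min(len(str(curr)), curr - 1) + helper(index+1, res_k)
--
--         for leave, code in [(0,0),(1,1),(9,2),(99,3)]:
--             if curr > leave and res_k >= curr - leave:
--                 minimum = min(minimum, code + helper(index+1,res_k + leave - curr))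
--
--         next = chars.find(chars[index], index+1)
--         delete = sum(frequency[index+1:next])
--         if next > 0 and res_k >= delete:
--             minimum = min(minimum, helper(next, res_k - delete, curr))
--
--         if carry == 0:
--             mem[index][res_k] = minimum
--
--         return minimum
--
--     frequency = []
--     chars = ""
--
--     for char in s:
--         if len(frequency) == 0 or char != chars[-1]:
--             frequency.append(0)
--             chars = chars + char
--
--         frequency[-1] += 1
--
--     mem = [[-1] * (k+1) for i in range(len(frequency))] + [[0] * (k+1)]
--
--     return helper(0, k)
-- ===== SOURCE B (Python) =====
-- def getLengthOfOptimalCompression(s: str, k: int) -> int: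
--     # Bottom-up DP over the run-length encoding, with precomputed prefix sums
--     # and next-same-char-run indices instead of per-call string.find and slice sums.
--     n = len(s)
--
--     # run-length encode by spans
--     runs = []
--     i = 0
--     while i < n:
--         j = i
--         while j < n and s[j] == s[i]:
--             j += 1
--         runs.append((s[i], j - i))
--         i = j
--     m = len(runs)
--     freq = [c for (_, c) in runs]
--
--     # prefix[i] = total length of runs 0..i-1
--     prefix = [0]
--     for c in freq:
--         prefix.append(prefix[-1] + c)
--
--     # nxt[i] = next run index with the same character, -1 if none
--     nxt = [-1] * m
--     last = {}
--     for i in range(m - 1, -1, -1):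
--         ch = runs[i][0]
--         if ch in last:
--             nxt[i] = last[ch]
--         last[ch] = i
--
--     def cost(c):
--         return 1 + min(len(str(c)), c - 1)
--
--     # dp[i][j] = minimal encoded length of runs i.. with j deletions available
--     dp = [[0] * (k + 1) for _ in range(m + 1)]
--
--     def f(i, j, carry):
--         curr = carry + freq[i]
--         best = cost(curr) + dp[i + 1][j]
--         for leave, code in ((0, 0), (1, 1), (9, 2), (99, 3)):
--             if curr > leave and j >= curr - leave:
--                 best = min(best, code + dp[i + 1][j - (curr - leave)])
--         nx = nxt[i]
--         if nx != -1:
--             delete = prefix[nx] - prefix[i + 1]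
--             if j >= delete:
--                 best = min(best, f(nx, j - delete, curr))
--         return best
--
--     for i in range(m - 1, -1, -1):
--         for j in range(k + 1):
--             dp[i][j] = f(i, j, 0)
--     return dp[0][k]
-- ===== Notes on version B (the rewrite author's own statement) =====
-- stated objective: alternative
-- what changed: A's memoized top-down recursion with a -1-sentinel table, per-call string.find and slice sums is replaced by an iterative bottom-up DP over the run-length encoding with precomputed prefix sums and a right-to-left last-seen-dict next-same-char-run index, so each state is evaluated from already-filled rows in O(1) per transition.
import Mathlib
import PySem

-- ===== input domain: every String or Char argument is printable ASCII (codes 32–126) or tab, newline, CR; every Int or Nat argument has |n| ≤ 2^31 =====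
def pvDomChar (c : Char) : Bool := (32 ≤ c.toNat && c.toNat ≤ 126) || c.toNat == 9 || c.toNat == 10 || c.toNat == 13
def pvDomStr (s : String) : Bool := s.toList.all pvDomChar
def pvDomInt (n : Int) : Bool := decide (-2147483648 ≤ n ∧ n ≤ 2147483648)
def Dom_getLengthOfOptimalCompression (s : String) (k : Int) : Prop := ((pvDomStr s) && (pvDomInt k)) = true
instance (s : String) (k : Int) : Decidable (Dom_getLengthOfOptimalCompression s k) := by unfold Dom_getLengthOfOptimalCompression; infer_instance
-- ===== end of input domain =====

-- B re-implements A's memoized top-down recursion as an iterative bottom-up DP over the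
-- run-length encoding with precomputed prefix sums and next-same-char-run indices
-- (objective: alternative algorithmic structure; equal return values proved for k ≥ 0,
-- where A returns at all).

-- ===== PORT A =====
-- literal port of A's inner 'helper' (fuel makes the recursion structural; the fuel
-- passed at the top is never exhausted on inputs A terminates on)
def pvHelperA (frequency : List Int) (chars : List Char) :
    Nat → Nat → Nat → Int → List (List Int) → Int × List (List Int)
  | 0, _, _, _, mem => (0, mem)
  | fuel+1, index, resk, carry, mem =>
    let memv := (mem.getD index []).getD resk (-1)
    if carry = 0 ∧ memv ≠ -1 then (memv, mem)
    else
      let curr := carry + frequency.getD index 0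
      let r1 := pvHelperA frequency chars fuel (index+1) resk 0 mem
      let minimum := 1 + min ((PySem.Int.toChars curr).length : Int) (curr - 1) + r1.1
      let st := [((0:Int),(0:Int)),(1,1),(9,2),(99,3)].foldl
        (fun (st : Int × List (List Int)) lc =>
          if curr > lc.1 ∧ (resk : Int) ≥ curr - lc.1 then
            let r := pvHelperA frequency chars fuel (index+1) (((resk : Int) + lc.1 - curr).toNat) 0 st.2
            (min st.1 (lc.2 + r.1), r.2)
          else st) (minimum, r1.2)
      let next := PySem.Chars.findFrom chars [chars.getD index ' '] ((index : Int)+1) none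
      let delete := (PySem.List.slice frequency (some ((index : Int)+1)) (some next)).sum
      let st2 :=
        if next > 0 ∧ (resk : Int) ≥ delete then
          let r := pvHelperA frequency chars fuel next.toNat (((resk : Int) - delete).toNat) curr st.2
          (min st.1 r.1, r.2)
        else st
      let mem2 := if carry = 0 then st2.2.set index ((st2.2.getD index []).set resk st2.1) else st2.2
      (st2.1, mem2)

def getLengthOfOptimalCompression (s : String) (k : Int) : Int :=
  let fc := s.toList.foldl
    (fun (fc : List Int × List Char) char =>
      let fc := if fc.1.length = 0 ∨ char ≠ fc.2.getLastD ' ' then (fc.1 ++ [0], fc.2 ++ [char]) else fc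
      (fc.1.dropLast ++ [fc.1.getLastD 0 + 1], fc.2)) ([], [])
  let frequency := fc.1
  let chars := fc.2
  let mem := List.replicate frequency.length (List.replicate (k+1).toNat (-1)) ++ [List.replicate (k+1).toNat 0]
  (pvHelperA frequency chars (frequency.length + 2) 0 k.toNat 0 mem).1

-- ===== PORT B =====
-- span-based run-length encoding (port of B's while-loop scan)
def pvRunsB : List Char → List (Char × Int)
  | [] => []
  | c :: rest => (c, 1 + (rest.takeWhile (· == c)).length) :: pvRunsB (rest.dropWhile (· == c))
  termination_by l => l.length
  decreasing_by simp only [List.length_cons]; exact Nat.lt_succ_of_le (List.length_dropWhile_le _ _)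

def pvCostB (c : Int) : Int := 1 + min ((PySem.Int.toChars c).length : Int) (c - 1)

-- port of B's 'f': evaluates one state from the already-filled dp rows below,
-- walking the next-same-char chain iteratively (fuel makes it structural)
def pvFB (freq prefx nxt : List Int) (dp : List (List Int)) :
    Nat → Nat → Nat → Int → Int
  | 0, _, _, _ => 0
  | fuel+1, i, j, carry =>
    let curr := carry + freq.getD i 0
    let best := pvCostB curr + (dp.getD (i+1) []).getD j 0
    let best := [((0:Int),(0:Int)),(1,1),(9,2),(99,3)].foldl
      (fun best lc =>
        if curr > lc.1 ∧ (j : Int) ≥ curr - lc.1 then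
          min best (lc.2 + (dp.getD (i+1) []).getD (((j : Int) - (curr - lc.1)).toNat) 0)
        else best) best
    let nx := nxt.getD i (-1)
    if nx ≠ -1 then
      let delete := prefx.getD nx.toNat 0 - prefx.getD (i+1) 0
      if (j : Int) ≥ delete then min best (pvFB freq prefx nxt dp fuel nx.toNat (((j : Int) - delete).toNat) curr)
      else best
    else best

def getLengthOfOptimalCompression_alt (s : String) (k : Int) : Int :=
  let runs := pvRunsB s.toList
  let m := runs.length
  let freq := runs.map (·.2)
  let prefx := freq.foldl (fun p c => p ++ [p.getLastD 0 + c]) [(0:Int)]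
  let nl := (PySem.List.pyRange ((m:Int)-1) (-1) (-1)).foldl
      (fun (st : List Int × PySem.Dict Char Int) i =>
        let ch := (runs.getD i.toNat (' ', 0)).1
        let nxt := if st.2.contains ch then st.1.set i.toNat (st.2.getD ch (-1)) else st.1
        (nxt, st.2.insert ch i))
      (List.replicate m (-1), PySem.Dict.empty)
  let nxt := nl.1
  let dp0 := List.replicate (m+1) (List.replicate (k+1).toNat (0:Int))
  let dp := (PySem.List.pyRange ((m:Int)-1) (-1) (-1)).foldl
      (fun dp i =>
        (PySem.List.pyRange 0 (k+1) 1).foldl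
          (fun dp j =>
            dp.set i.toNat ((dp.getD i.toNat []).set j.toNat (pvFB freq prefx nxt dp (m+1) i.toNat j.toNat 0))) dp) dp0
  (dp.getD 0 []).getD k.toNat 0

-- ===== PRECONDITION & SPEC =====
-- Pre_ excludes exactly k < 0, where A raises IndexError (mem rows are empty lists).
def Pre_getLengthOfOptimalCompression (s : String) (k : Int) : Prop := 0 ≤ k
instance (s : String) (k : Int) : Decidable (Pre_getLengthOfOptimalCompression s k) := by
  unfold Pre_getLengthOfOptimalCompression; infer_instance

def pvWitness_getLengthOfOptimalCompression : String × Int := ("aaabcccd", 2)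

def Spec_getLengthOfOptimalCompression (s : String) (k : Int) (out : Int) : Prop := out = getLengthOfOptimalCompression_alt s k
instance (s : String) (k : Int) (out : Int) : Decidable (Spec_getLengthOfOptimalCompression s k out) := by unfold Spec_getLengthOfOptimalCompression; infer_instance

-- ===== CLAIM (what is proved, stated in full; the proofs are below) =====
def Claim_equal_getLengthOfOptimalCompression : Prop := ∀ (s : String) (k : Int), Dom_getLengthOfOptimalCompression s k → Pre_getLengthOfOptimalCompression s k → Spec_getLengthOfOptimalCompression s k (getLengthOfOptimalCompression s k)

-- ===== LEMMAS AND PROOFS =====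


-- first index ≥ st where l[idx] = c, else -1 (reference form of str.find(c, st))
def pvFirst (l : List Char) (c : Char) (st : Nat) : Int :=
  if h : st < l.length then (if l[st] = c then (st:Int) else pvFirst l c (st+1)) else -1
  termination_by l.length - st

lemma pvDropSucc (l : List Char) (st : Nat) (x : Char) (h : x ∈ l.drop (st+1)) : x ∈ l.drop st := by
  have hd : l.drop (st+1) = (l.drop st).drop 1 := by rw [List.drop_drop]
  rw [hd] at h; exact List.mem_of_mem_drop h

lemma pvFirst_neg_one (l : List Char) (c : Char) (st : Nat) (h : c ∉ l.drop st) :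
    pvFirst l c st = -1 := by
  unfold pvFirst
  split
  · rename_i hlt
    have hcons : l.drop st = l[st] :: l.drop (st+1) := List.drop_eq_getElem_cons hlt
    have hne : ¬ l[st] = c := fun he => h (by rw [hcons, he]; exact List.mem_cons_self ..)
    rw [if_neg hne]
    exact pvFirst_neg_one l c (st+1) (fun hm => h (pvDropSucc l st c hm))
  · rfl
  termination_by l.length - st

lemma pvFirst_eq_of_first (l : List Char) (c : Char) (r : Nat) (hr : r < l.length) (hc : l[r] = c)
    (st : Nat) (hst : st ≤ r) (hmin : ∀ i (_ : i < l.length), st ≤ i → i < r → l[i] ≠ c) :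
    pvFirst l c st = (r:Int) := by
  unfold pvFirst
  have hlt : st < l.length := lt_of_le_of_lt hst hr
  rw [dif_pos hlt]
  by_cases he : l[st] = c
  · have : ¬ st < r := fun hlt' => hmin st hlt (le_refl _) hlt' he
    have : st = r := by omega
    rw [if_pos he, this]
  · rw [if_neg he]
    have hne : st ≠ r := by
      intro hh; subst hh; exact he hc
    exact pvFirst_eq_of_first l c r hr hc (st+1) (by omega)
      (fun i hi h1 h2 => hmin i hi (by omega) h2)
  termination_by r - st

lemma pvPrefixSingleton (c : Char) (t : List Char) : [c] <+: t ↔ t.head? = some c := by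
  constructor
  · rintro ⟨r, rfl⟩; rfl
  · intro h; cases t with
    | nil => simp at h
    | cons a r => simp at h; exact ⟨r, by simp [h]⟩

lemma pvFind_eq_pvFirst (l : List Char) (c : Char) (st : Nat) (hst : st ≤ l.length) :
    PySem.Chars.findFrom l [c] (st : Int) none = pvFirst l c st := by
  by_cases hin : c ∈ l.drop st
  · have hne : PySem.Chars.findFrom l [c] (st : Int) none ≠ -1 := by
      rw [Ne, PySem.Chars.findFrom_natCast_eq_neg_one_iff l [c] st hst, List.singleton_infix_iff]
      exact fun h => h hin
    obtain ⟨h1, h2, h3⟩ := PySem.Chars.findFrom_natCast_spec l [c] st hst hne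
    set r := PySem.Chars.findFrom l [c] (st : Int) none with hrdef
    have hr0 : 0 ≤ r := le_trans (by exact_mod_cast Int.natCast_nonneg st) h1
    have hhead : (l.drop r.toNat).head? = some c := (pvPrefixSingleton c _).mp h2
    have hrl : r.toNat < l.length := by
      by_contra hge
      rw [List.drop_eq_nil_of_le (by omega)] at hhead; simp at hhead
    have hcr : l[r.toNat] = c := by
      have : (l.drop r.toNat).head? = some l[r.toNat] := by
        rw [List.drop_eq_getElem_cons hrl]; rfl
      rw [this] at hhead; exact (Option.some.injEq ..).mp hhead
    have hstr : st ≤ r.toNat := by omega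
    have := pvFirst_eq_of_first l c r.toNat hrl hcr st hstr (fun i hi hsi hir => by
      intro hic
      exact h3 i hsi hir ((pvPrefixSingleton c _).mpr (by
        rw [List.drop_eq_getElem_cons hi]; simp [hic])))
    rw [this]; omega
  · rw [pvFirst_neg_one l c st hin]
    rw [PySem.Chars.findFrom_natCast_eq_neg_one_iff l [c] st hst, List.singleton_infix_iff]
    exact fun h => hin h

lemma pvFirst_bounds (l : List Char) (c : Char) (st : Nat) :
    pvFirst l c st = -1 ∨ (0 ≤ pvFirst l c st ∧ st ≤ (pvFirst l c st).toNat ∧ (pvFirst l c st).toNat < l.length) := by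
  unfold pvFirst
  split
  · rename_i hlt
    by_cases he : l[st] = c
    · rw [if_pos he]; right; refine ⟨by omega, by omega, by omega⟩
    · rw [if_neg he]
      rcases pvFirst_bounds l c (st+1) with h | ⟨h1, h2, h3⟩
      · left; exact h
      · right; exact ⟨h1, by omega, h3⟩
  · left; rfl
  termination_by l.length - st

def pvNext (chars : List Char) (i : Nat) : Int :=
  PySem.Chars.findFrom chars [chars.getD i ' '] ((i:Int)+1) none

lemma pvNext_eq_pvFirst (chars : List Char) (i : Nat) (h : i < chars.length) :
    pvNext chars i = pvFirst chars (chars.getD i ' ') (i+1) := by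
  unfold pvNext
  have hc : ((i:Int)+1) = ((i+1:Nat):Int) := by push_cast; ring
  rw [hc, pvFind_eq_pvFirst _ _ _ (by omega)]

lemma pvNext_bounds (chars : List Char) (i : Nat) (h : i < chars.length) :
    pvNext chars i = -1 ∨ (0 ≤ pvNext chars i ∧ i+1 ≤ (pvNext chars i).toNat ∧ (pvNext chars i).toNat < chars.length) := by
  rw [pvNext_eq_pvFirst chars i h]
  rcases pvFirst_bounds chars (chars.getD i ' ') (i+1) with h1 | ⟨h1, h2, h3⟩
  · left; exact h1
  · right; exact ⟨h1, h2, h3⟩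

lemma pvNext_pos_iff (chars : List Char) (i : Nat) (h : i < chars.length) :
    0 < pvNext chars i ↔ pvNext chars i ≠ -1 := by
  rcases pvNext_bounds chars i h with h1 | ⟨h1, h2, h3⟩
  · rw [h1]; constructor <;> intro hh <;> omega
  · constructor
    · intro _; omega
    · intro _; omega

-- canonical (memo-free) value function shared by both correctness proofs:
-- pvH freq chars fuel i j carry = value of A's helper(i, j, carry) for large enough fuel
def pvH (freq : List Int) (chars : List Char) : Nat → Nat → Nat → Int → Int
  | 0, _, _, _ => 0
  | fuel+1, i, j, carry =>
    if freq.length ≤ i then 0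
    else
      let curr := carry + freq.getD i 0
      let minimum := 1 + min ((PySem.Int.toChars curr).length : Int) (curr - 1) + pvH freq chars fuel (i+1) j 0
      let minimum := [((0:Int),(0:Int)),(1,1),(9,2),(99,3)].foldl
        (fun mn lc => if curr > lc.1 ∧ (j:Int) ≥ curr - lc.1 then
            min mn (lc.2 + pvH freq chars fuel (i+1) (((j:Int) + lc.1 - curr).toNat) 0) else mn) minimum
      let next := pvNext chars i
      let delete := (PySem.List.slice freq (some ((i:Int)+1)) (some next)).sum
      if next > 0 ∧ (j:Int) ≥ delete then
        min minimum (pvH freq chars fuel next.toNat (((j:Int) - delete).toNat) curr)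
      else minimum

def pvHc (freq : List Int) (chars : List Char) (i j : Nat) (carry : Int) : Int :=
  pvH freq chars (freq.length - i + 1) i j carry

lemma pvHc_base (freq : List Int) (chars : List Char) (i j : Nat) (carry : Int)
    (h : freq.length ≤ i) : pvHc freq chars i j carry = 0 := by
  unfold pvHc pvH
  rw [if_pos h]

lemma pvH_fuel (freq : List Int) (chars : List Char) (hlen : chars.length = freq.length) :
    ∀ f1 f2 i j c, freq.length - i < f1 → freq.length - i < f2 →
      pvH freq chars f1 i j c = pvH freq chars f2 i j c := by
  intro f1
  induction f1 with
  | zero => intro f2 i j c h1 h2; omega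
  | succ f1 ih =>
    intro f2 i j c h1 h2
    cases f2 with
    | zero => omega
    | succ f2 =>
      by_cases hmi : freq.length ≤ i
      · simp only [pvH, if_pos hmi]
      · have hstep : ∀ j' c', pvH freq chars f1 (i+1) j' c' = pvH freq chars f2 (i+1) j' c' :=
          fun j' c' => ih f2 (i+1) j' c' (by omega) (by omega)
        have hchain : ∀ j' c', 0 < pvNext chars i →
            pvH freq chars f1 (pvNext chars i).toNat j' c' = pvH freq chars f2 (pvNext chars i).toNat j' c' := by
          intro j' c' hpos
          rcases pvNext_bounds chars i (by omega) with hb | ⟨hb1, hb2, hb3⟩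
          · omega
          · exact ih f2 _ j' c' (by omega) (by omega)
        simp only [pvH, if_neg hmi]
        simp only [hstep]
        by_cases hg : 0 < pvNext chars i ∧
            (j:Int) ≥ (PySem.List.slice freq (some ((i:Int)+1)) (some (pvNext chars i))).sum
        · rw [if_pos hg, if_pos hg, hchain _ _ hg.1]
        · rw [if_neg hg, if_neg hg]

-- one unfolding of the recurrence, with canonical subvalues
def pvBody (freq : List Int) (chars : List Char) (i j : Nat) (carry : Int) : Int :=
  let curr := carry + freq.getD i 0
  let minimum := 1 + min ((PySem.Int.toChars curr).length : Int) (curr - 1) + pvHc freq chars (i+1) j 0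
  let minimum := [((0:Int),(0:Int)),(1,1),(9,2),(99,3)].foldl
    (fun mn lc => if curr > lc.1 ∧ (j:Int) ≥ curr - lc.1 then
        min mn (lc.2 + pvHc freq chars (i+1) (((j:Int) + lc.1 - curr).toNat) 0) else mn) minimum
  let next := pvNext chars i
  let delete := (PySem.List.slice freq (some ((i:Int)+1)) (some next)).sum
  if next > 0 ∧ (j:Int) ≥ delete then
    min minimum (pvHc freq chars next.toNat (((j:Int) - delete).toNat) curr)
  else minimum

lemma pvHc_eq_body (freq : List Int) (chars : List Char) (hlen : chars.length = freq.length)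
    (i j : Nat) (carry : Int) (hi : i < freq.length) :
    pvHc freq chars i j carry = pvBody freq chars i j carry := by
  unfold pvHc pvBody
  have hm : freq.length - i + 1 = (freq.length - i) + 1 := rfl
  rw [hm]
  have hstep : ∀ j' c', pvH freq chars (freq.length - i) (i+1) j' c' = pvHc freq chars (i+1) j' c' := by
    intro j' c'; unfold pvHc
    exact pvH_fuel freq chars hlen _ _ (i+1) j' c' (by omega) (by omega)
  have hchain : ∀ j' c', 0 < pvNext chars i →
      pvH freq chars (freq.length - i) (pvNext chars i).toNat j' c' = pvHc freq chars (pvNext chars i).toNat j' c' := by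
    intro j' c' hpos
    rcases pvNext_bounds chars i (by omega) with hb | ⟨hb1, hb2, hb3⟩
    · omega
    · unfold pvHc
      exact pvH_fuel freq chars hlen _ _ _ j' c' (by omega) (by omega)
  simp only [pvH, if_neg (show ¬ freq.length ≤ i by omega)]
  simp only [hstep]
  by_cases hg : 0 < pvNext chars i ∧
      (j:Int) ≥ (PySem.List.slice freq (some ((i:Int)+1)) (some (pvNext chars i))).sum
  · rw [if_pos hg, if_pos hg, hchain _ _ hg.1]
  · rw [if_neg hg, if_neg hg]

-- memo-table invariant: right shape, zero base row, every filled entry is the canonical value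
def pvInv (freq : List Int) (chars : List Char) (K : Nat) (mem : List (List Int)) : Prop :=
  mem.length = freq.length + 1 ∧
  (∀ r ∈ mem, r.length = K + 1) ∧
  (∀ j, j ≤ K → (mem.getD freq.length []).getD j (-1) = 0) ∧
  (∀ i j, i ≤ freq.length → j ≤ K →
     (mem.getD i []).getD j (-1) = -1 ∨ (mem.getD i []).getD j (-1) = pvHc freq chars i j 0)

lemma pvGetDset_self {α : Type} [Inhabited α] (l : List α) (i : Nat) (d : α) (v : α) (h : i < l.length) :
    (l.set i v).getD i d = v := by
  simp [List.getD_eq_getElem?_getD, List.getElem?_set_self h]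

lemma pvGetDset_ne {α : Type} [Inhabited α] (l : List α) (i i' : Nat) (d : α) (v : α) (h : i ≠ i') :
    (l.set i v).getD i' d = l.getD i' d := by
  simp [List.getD_eq_getElem?_getD, List.getElem?_set_ne h]

lemma pvInv_set (freq : List Int) (chars : List Char) (K : Nat) (mem : List (List Int))
    (hInv : pvInv freq chars K mem) (i j : Nat) (hi : i ≤ freq.length) (hj : j ≤ K) (v : Int)
    (hv : v = pvHc freq chars i j 0) :
    pvInv freq chars K (mem.set i ((mem.getD i []).set j v)) := by
  obtain ⟨hL, hR, h0, h4⟩ := hInv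
  have hiL : i < mem.length := by omega
  have hrow : mem.getD i [] = mem[i] := by
    simp [List.getD_eq_getElem?_getD, List.getElem?_eq_getElem hiL]
  have hrlen : (mem.getD i []).length = K + 1 := by rw [hrow]; exact hR _ (List.getElem_mem hiL)
  refine ⟨by simp [hL], ?_, ?_, ?_⟩
  · intro r hr
    rcases List.mem_or_eq_of_mem_set hr with h | h
    · exact hR r h
    · rw [h, List.length_set]; exact hrlen
  · intro j' hj'
    by_cases he : i = freq.length
    · rw [← he, pvGetDset_self _ _ _ _ hiL]
      by_cases hjj : j = j'
      · rw [← hjj, pvGetDset_self _ _ _ _ (by omega), hv, he, pvHc_base _ _ _ _ _ (le_refl _)]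
      · rw [pvGetDset_ne _ _ _ _ _ hjj, he]; exact h0 j' hj'
    · rw [pvGetDset_ne _ _ _ _ _ he]; exact h0 j' hj'
  · intro i' j' hi' hj'
    by_cases he : i = i'
    · rw [← he, pvGetDset_self _ _ _ _ hiL]
      by_cases hjj : j = j'
      · rw [← hjj, pvGetDset_self _ _ _ _ (by omega), hv]; right; rfl
      · rw [pvGetDset_ne _ _ _ _ _ hjj]
        have := h4 i j' (by omega) hj'
        rw [← he] at *; exact this
    · rw [pvGetDset_ne _ _ _ _ _ he]; exact h4 i' j' hi' hj'

lemma pvFoldA (freq : List Int) (chars : List Char) (K fuel i j : Nat) (curr : Int)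
    (hrec : ∀ j' mem, j' ≤ K → pvInv freq chars K mem →
       (pvHelperA freq chars fuel (i+1) j' 0 mem).1 = pvHc freq chars (i+1) j' 0 ∧
       pvInv freq chars K ((pvHelperA freq chars fuel (i+1) j' 0 mem).2))
    (hj : j ≤ K) :
    ∀ (opts : List (Int × Int)) (st : Int × List (List Int)), pvInv freq chars K st.2 →
      (opts.foldl (fun (st : Int × List (List Int)) lc =>
          if curr > lc.1 ∧ (j:Int) ≥ curr - lc.1 then
            (min st.1 (lc.2 + (pvHelperA freq chars fuel (i+1) (((j:Int) + lc.1 - curr).toNat) 0 st.2).1),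
             (pvHelperA freq chars fuel (i+1) (((j:Int) + lc.1 - curr).toNat) 0 st.2).2)
          else st) st).1 =
        opts.foldl (fun mn lc => if curr > lc.1 ∧ (j:Int) ≥ curr - lc.1 then
            min mn (lc.2 + pvHc freq chars (i+1) (((j:Int) + lc.1 - curr).toNat) 0) else mn) st.1 ∧
      pvInv freq chars K
        ((opts.foldl (fun (st : Int × List (List Int)) lc =>
          if curr > lc.1 ∧ (j:Int) ≥ curr - lc.1 then
            (min st.1 (lc.2 + (pvHelperA freq chars fuel (i+1) (((j:Int) + lc.1 - curr).toNat) 0 st.2).1),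
             (pvHelperA freq chars fuel (i+1) (((j:Int) + lc.1 - curr).toNat) 0 st.2).2)
          else st) st).2) := by
  intro opts
  induction opts with
  | nil => intro st hst; exact ⟨rfl, hst⟩
  | cons lc rest ihl =>
    intro st hst
    simp only [List.foldl_cons]
    by_cases hglc : curr > lc.1 ∧ (j:Int) ≥ curr - lc.1
    · rw [if_pos hglc, if_pos hglc]
      have hj' : ((j:Int) + lc.1 - curr).toNat ≤ K := by omega
      obtain ⟨hv, hI⟩ := hrec (((j:Int) + lc.1 - curr).toNat) st.2 hj' hst
      rw [hv]
      exact ihl (min st.1 (lc.2 + pvHc freq chars (i+1) (((j:Int) + lc.1 - curr).toNat) 0),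
             (pvHelperA freq chars fuel (i+1) (((j:Int) + lc.1 - curr).toNat) 0 st.2).2) hI
    · rw [if_neg hglc, if_neg hglc]
      exact ihl st hst


lemma pvHelperA_correct (freq : List Int) (chars : List Char)
    (hlen : chars.length = freq.length) (hpos : ∀ x ∈ freq, 1 ≤ x) (K : Nat) :
    ∀ fuel i j (carry : Int) mem, pvInv freq chars K mem → i ≤ freq.length → j ≤ K → 0 ≤ carry →
      (0 < carry → i < freq.length) → freq.length - i < fuel →
      (pvHelperA freq chars fuel i j carry mem).1 = pvHc freq chars i j carry ∧
      pvInv freq chars K ((pvHelperA freq chars fuel i j carry mem).2) := by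
  intro fuel
  induction fuel with
  | zero => intro i j carry mem _ _ _ _ _ h; omega
  | succ fuel ih =>
    intro i j carry mem hInv hi hj hc0 hcpos hfuel
    by_cases hhit : carry = 0 ∧ (mem.getD i []).getD j (-1) ≠ -1
    · have hred : pvHelperA freq chars (fuel+1) i j carry mem = ((mem.getD i []).getD j (-1), mem) := by
        simp only [pvHelperA]; rw [if_pos hhit]
      rw [hred]
      rcases hInv.2.2.2 i j hi hj with hm | hm
      · exact absurd hm hhit.2
      · exact ⟨by rw [hm, hhit.1], hInv⟩
    · have him : i < freq.length := by
        rcases Nat.lt_or_ge i freq.length with h | h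
        · exact h
        · exfalso
          have hieq : i = freq.length := by omega
          have hcz : carry = 0 := by
            by_contra hne
            exact absurd (hcpos (by omega)) (by omega)
          apply hhit
          refine ⟨hcz, ?_⟩
          rw [hieq, hInv.2.2.1 j hj]
          omega
      have hrec : ∀ j' mem', j' ≤ K → pvInv freq chars K mem' →
          (pvHelperA freq chars fuel (i+1) j' 0 mem').1 = pvHc freq chars (i+1) j' 0 ∧
          pvInv freq chars K ((pvHelperA freq chars fuel (i+1) j' 0 mem').2) :=
        fun j' mem' hj' hI' => ih (i+1) j' 0 mem' hI' (by omega) hj' le_rfl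
          (fun h => absurd h (by omega)) (by omega)
      simp only [pvHelperA]
      rw [if_neg hhit]
      have hfind : PySem.Chars.findFrom chars [chars.getD i ' '] ((i:Int)+1) none = pvNext chars i := rfl
      rw [hfind]
      set curr := carry + freq.getD i 0 with hcurr
      have hcurrpos : 0 < curr := by
        have hmem : freq.getD i 0 = freq[i] := List.getD_eq_getElem freq 0 him
        have := hpos freq[i] (List.getElem_mem him)
        omega
      obtain ⟨hr1v, hr1I⟩ := hrec j mem hj hInv
      set r1 := pvHelperA freq chars fuel (i+1) j 0 mem with hr1def
      set minim := 1 + min ((PySem.Int.toChars curr).length : Int) (curr - 1) + r1.1 with hminim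
      obtain ⟨hfv, hfI⟩ := pvFoldA freq chars K fuel i j curr hrec hj
        [((0:Int),(0:Int)),(1,1),(9,2),(99,3)] (minim, r1.2) hr1I
      set stF := List.foldl (fun (st : Int × List (List Int)) lc =>
          if curr > lc.1 ∧ (j:Int) ≥ curr - lc.1 then
            (min st.1 (lc.2 + (pvHelperA freq chars fuel (i+1) (((j:Int) + lc.1 - curr).toNat) 0 st.2).1),
             (pvHelperA freq chars fuel (i+1) (((j:Int) + lc.1 - curr).toNat) 0 st.2).2)
          else st) (minim, r1.2) [((0:Int),(0:Int)),(1,1),(9,2),(99,3)] with hstF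
      have hfv' : stF.1 = List.foldl (fun mn lc =>
          if curr > lc.1 ∧ (j:Int) ≥ curr - lc.1 then
            min mn (lc.2 + pvHc freq chars (i+1) (((j:Int) + lc.1 - curr).toNat) 0)
          else mn) minim [((0:Int),(0:Int)),(1,1),(9,2),(99,3)] := hfv
      set del := (PySem.List.slice freq (some ((i:Int) + 1)) (some (pvNext chars i))).sum with hdel
      have hdel0 : 0 ≤ del := by
        rw [hdel]
        refine List.sum_nonneg (fun x hx => ?_)
        have := hpos x (PySem.List.mem_of_mem_slice freq _ _ hx)
        omega
      by_cases hg : pvNext chars i > 0 ∧ (j:Int) ≥ del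
      · rcases pvNext_bounds chars i (by omega) with hm1 | ⟨hb1, hb2, hb3⟩
        · exfalso; rw [hm1] at hg; omega
        · have hj2 : ((j:Int) - del).toNat ≤ K := by omega
          obtain ⟨hchv, hchI⟩ := ih (pvNext chars i).toNat (((j:Int) - del).toNat) curr stF.2 hfI
            (by omega) hj2 (by omega) (fun _ => by omega) (by omega)
          set ch := pvHelperA freq chars fuel (pvNext chars i).toNat (((j:Int) - del).toNat) curr stF.2 with hchdef
          rw [if_pos hg]
          have hval : min stF.1 ch.1 = pvHc freq chars i j carry := by
            rw [pvHc_eq_body freq chars hlen i j carry him]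
            simp only [pvBody]
            rw [← hcurr, ← hdel, if_pos hg, hfv', hminim, hr1v, hchv]
          refine ⟨hval, ?_⟩
          by_cases hcz : carry = 0
          · rw [if_pos hcz]
            exact pvInv_set freq chars K ch.2 hchI i j (le_of_lt him) hj _
              (hval.trans (by rw [hcz]))
          · rw [if_neg hcz]
            exact hchI
      · rw [if_neg hg]
        have hval : stF.1 = pvHc freq chars i j carry := by
          rw [pvHc_eq_body freq chars hlen i j carry him]
          simp only [pvBody]
          rw [← hcurr, ← hdel, if_neg hg, hfv', hminim, hr1v]
        refine ⟨hval, ?_⟩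
        by_cases hcz : carry = 0
        · rw [if_pos hcz]
          exact pvInv_set freq chars K stF.2 hfI i j (le_of_lt him) hj _
            (hval.trans (by rw [hcz]))
        · rw [if_neg hcz]
          exact hfI

lemma pvRunsB_ne_nil (c : Char) (l : List Char) : pvRunsB (c :: l) ≠ [] := by
  rw [pvRunsB]; exact List.cons_ne_nil _ _

lemma pvRuns_snoc (p : List Char) (c : Char) :
    pvRunsB (p ++ [c]) = if p.getLast? = some c
      then (pvRunsB p).dropLast ++ [(c, ((pvRunsB p).getLastD (c,0)).2 + 1)]
      else pvRunsB p ++ [(c,1)] := by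
  induction p using pvRunsB.induct with
  | case1 =>
    simp [pvRunsB]
  | case2 c0 rest ih =>
    rcases hsplit : rest.dropWhile (· == c0) with _ | ⟨d, r⟩
    · -- rest is all c0
      have hall : ∀ x ∈ rest, (x == c0) = true := List.dropWhile_eq_nil_iff.mp hsplit
      have htake : rest.takeWhile (· == c0) = rest := by
        conv_rhs => rw [← List.takeWhile_append_dropWhile (p := (· == c0)) (l := rest)]
        rw [hsplit, List.append_nil]
      have hlast : (c0 :: rest).getLast? = some c0 := by
        cases hrl : rest.getLast? with
        | none => rw [List.getLast?_eq_none_iff] at hrl; subst hrl; rfl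
        | some x =>
          have hx : x ∈ rest := List.mem_of_getLast? hrl
          have hxc : x = c0 := by simpa using hall x hx
          rw [List.getLast?_cons, hrl]
          simp [hxc]
      have hunf : pvRunsB (c0 :: rest) = (c0, 1 + ((rest.takeWhile (· == c0)).length : Int)) :: pvRunsB (rest.dropWhile (· == c0)) := by
        rw [pvRunsB]
      by_cases hc : c = c0
      · subst hc
        rw [List.cons_append, pvRunsB,
          List.takeWhile_append_of_pos hall, List.dropWhile_append_of_pos hall]
        rw [if_pos hlast, hunf, htake, hsplit]
        simp [pvRunsB]
        omega
      · rw [List.cons_append, pvRunsB,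
          List.takeWhile_append_of_pos hall, List.dropWhile_append_of_pos hall]
        rw [if_neg (by rw [hlast]; intro h; exact hc (by simpa using h.symm)), hunf, htake, hsplit]
        have hcb : (c == c0) = false := by simp [hc]
        simp [pvRunsB, hcb]
    · -- rest = t ++ d :: r with (d == c0) = false
      have hne : rest.dropWhile (· == c0) ≠ [] := by rw [hsplit]; exact List.cons_ne_nil _ _
      have hpd : (d == c0) = false := by
        have h := List.head_dropWhile_not (· == c0) hne
        simp only [hsplit, List.head_cons] at h
        exact h
      have hrest : rest = rest.takeWhile (· == c0) ++ (d :: r) := by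
        conv_lhs => rw [← List.takeWhile_append_dropWhile (p := (· == c0)) (l := rest)]
        rw [hsplit]
      have hallt : ∀ x ∈ rest.takeWhile (· == c0), (x == c0) = true :=
        fun x hx => List.mem_takeWhile_imp (p := (· == c0)) (l := rest) hx
      have hunf2 : pvRunsB (c0 :: rest) = (c0, 1 + ((rest.takeWhile (· == c0)).length : Int)) :: pvRunsB (rest.dropWhile (· == c0)) := by
        rw [pvRunsB]
      rw [List.cons_append, pvRunsB]
      have htk : (rest ++ [c]).takeWhile (· == c0) = rest.takeWhile (· == c0) := by
        conv_lhs => rw [hrest]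
        rw [List.append_assoc, List.takeWhile_append_of_pos hallt, List.cons_append,
          List.takeWhile_cons]
        simp [hpd]
      have hdw : (rest ++ [c]).dropWhile (· == c0) = (d :: r) ++ [c] := by
        conv_lhs => rw [hrest]
        rw [List.append_assoc, List.dropWhile_append_of_pos hallt, List.cons_append,
          List.dropWhile_cons]
        simp [hpd]
      rw [hsplit] at ih
      simp only [List.cons_append] at ih ⊢
      rw [htk, hdw] 
      simp only [List.cons_append]
      rw [ih, hunf2, hsplit]
      have hlast2 : (c0 :: rest).getLast? = (d :: r).getLast? := by
        rw [List.getLast?_cons, hrest, List.getLast?_append]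
        cases hx : (d :: r).getLast? with
        | none => simp at hx
        | some y => simp
      rw [hlast2]
      by_cases hcond : (d :: r).getLast? = some c
      · rw [if_pos hcond, if_pos hcond]
        rw [List.dropLast_cons_of_ne_nil (pvRunsB_ne_nil d r), List.cons_append]
        congr 2
        rw [List.getLastD_eq_getLast?, List.getLastD_eq_getLast?, List.getLast?_cons]
        cases hy : (pvRunsB (d :: r)).getLast? with
        | none => exact absurd (List.getLast?_eq_none_iff.mp hy) (pvRunsB_ne_nil d r)
        | some y => simp
      · rw [if_neg hcond, if_neg hcond, List.cons_append]

lemma pvRuns_last_char (p : List Char) : ((pvRunsB p).getLast?).map Prod.fst = p.getLast? := by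
  induction p using List.reverseRecOn with
  | nil => simp [pvRunsB]
  | append_singleton p c ihp =>
    rw [pvRuns_snoc, List.getLast?_concat]
    by_cases hcond : p.getLast? = some c
    · rw [if_pos hcond, List.getLast?_concat]; rfl
    · rw [if_neg hcond, List.getLast?_concat]; rfl

lemma pvRuns_pos (p : List Char) : ∀ x ∈ pvRunsB p, 1 ≤ x.2 := by
  induction p using pvRunsB.induct with
  | case1 => intro x hx; simp [pvRunsB] at hx
  | case2 c0 rest ih =>
    intro x hx
    rw [pvRunsB] at hx
    rcases List.mem_cons.mp hx with h | h
    · rw [h]; dsimp only; omega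
    · exact ih x h

lemma pvDropLastLast {α : Type} (l : List α) (a : α) (h : l.getLast? = some a) :
    l.dropLast ++ [a] = l := by
  have hne : l ≠ [] := by intro he; rw [he] at h; simp at h
  rw [List.getLast?_eq_getLast hne] at h
  injection h with h3
  rw [← h3]
  exact List.dropLast_concat_getLast hne

lemma pvRLE_fold (l : List Char) :
    l.foldl (fun (fc : List Int × List Char) char =>
      let fc := if fc.1.length = 0 ∨ char ≠ fc.2.getLastD ' ' then (fc.1 ++ [0], fc.2 ++ [char]) else fc
      (fc.1.dropLast ++ [fc.1.getLastD 0 + 1], fc.2)) ([], [])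
    = ((pvRunsB l).map (·.2), (pvRunsB l).map (·.1)) := by
  induction l using List.reverseRecOn with
  | nil => simp [pvRunsB]
  | append_singleton p c ihp =>
    rw [List.foldl_append, ihp]
    simp only [List.foldl_cons, List.foldl_nil]
    rw [pvRuns_snoc]
    have hlastc : ((pvRunsB p).map (·.1)).getLast? = Option.map Prod.fst ((pvRunsB p).getLast?) := by
      rw [List.getLast?_map]
    by_cases hcond : p.getLast? = some c
    · rw [if_pos hcond]
      have hyex : ∃ y, (pvRunsB p).getLast? = some y ∧ y.1 = c := by
        have h := pvRuns_last_char p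
        rw [hcond] at h
        rcases Option.map_eq_some_iff.mp h with ⟨y, hy1, hy2⟩
        exact ⟨y, hy1, hy2⟩
      obtain ⟨y, hy, hyc⟩ := hyex
      have hrne : pvRunsB p ≠ [] := by
        intro h; rw [h] at hy; simp at hy
      have hguard : ¬ (((pvRunsB p).map (·.2)).length = 0 ∨ c ≠ ((pvRunsB p).map (·.1)).getLastD ' ') := by
        push_neg
        constructor
        · simp only [List.length_map]
          intro h
          exact hrne (List.length_eq_zero_iff.mp h)
        · rw [List.getLastD_eq_getLast?, hlastc, hy]
          simp [hyc]
      rw [if_neg hguard]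
      simp only [List.map_append, List.map_cons, List.map_nil]
      refine Prod.ext ?_ ?_
      · show ((pvRunsB p).map (·.2)).dropLast ++ [((pvRunsB p).map (·.2)).getLastD 0 + 1]
          = ((pvRunsB p).dropLast).map (·.2) ++ [((pvRunsB p).getLastD (c,0)).2 + 1]
        rw [List.map_dropLast]
        congr 3
        · rw [List.getLastD_eq_getLast?, List.getLast?_map, hy, List.getLastD_eq_getLast?, hy]
          rfl
      · show (pvRunsB p).map (·.1) = ((pvRunsB p).dropLast).map (·.1) ++ [c]
        rw [List.map_dropLast]
        exact (pvDropLastLast _ c (by rw [hlastc, hy]; simp [hyc])).symm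
    · rw [if_neg hcond]
      by_cases hrnil : pvRunsB p = []
      · rw [hrnil]
        simp [pvRunsB]
      · have hyex : ∃ y, (pvRunsB p).getLast? = some y := by
          cases hx : (pvRunsB p).getLast? with
          | none => exact absurd (List.getLast?_eq_none_iff.mp hx) hrnil
          | some y => exact ⟨y, rfl⟩
        obtain ⟨y, hy⟩ := hyex
        have hyne : y.1 ≠ c := by
          intro h
          apply hcond
          rw [← pvRuns_last_char p, hy, Option.map_some, h]
        have hguard : (((pvRunsB p).map (·.2)).length = 0 ∨ c ≠ ((pvRunsB p).map (·.1)).getLastD ' ') := by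
          right
          rw [List.getLastD_eq_getLast?, hlastc, hy]
          simp
          exact fun h => hyne h.symm
        rw [if_pos hguard]
        simp only [List.map_append, List.map_cons, List.map_nil]
        refine Prod.ext ?_ ?_
        · show (((pvRunsB p).map (fun y : Char × Int => y.2) ++ [0]).dropLast ++ [((pvRunsB p).map (fun y : Char × Int => y.2) ++ [0]).getLastD 0 + 1])
            = (pvRunsB p).map (fun y : Char × Int => y.2) ++ [1]
          rw [List.dropLast_concat, List.getLastD_concat]
          norm_num
        · rfl

-- prefix sums: B's running-total loop is List.scanl, whose entries are take-sums
lemma pvPrefix_fold (l : List Int) (p : List Int) (a : Int) :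
    List.foldl (fun p c => p ++ [p.getLastD 0 + c]) (p ++ [a]) l = p ++ List.scanl (· + ·) a l := by
  induction l generalizing p a with
  | nil => simp [List.scanl]
  | cons c cs ih =>
    simp only [List.foldl_cons, List.getLastD_concat]
    rw [List.append_assoc]
    rw [show p ++ ([a] ++ [a + c]) = (p ++ [a]) ++ [a + c] by rw [List.append_assoc]]
    rw [ih (p ++ [a]) (a + c), List.append_assoc, List.scanl_cons]
    rfl

lemma pvScanl_getD (l : List Int) (a : Int) (t : Nat) (h : t ≤ l.length) :
    (List.scanl (· + ·) a l).getD t 0 = a + (l.take t).sum := by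
  induction l generalizing a t with
  | nil =>
    have : t = 0 := by simpa using h
    simp [this, List.scanl]
  | cons c cs ih =>
    rw [List.scanl_cons]
    cases t with
    | zero => simp
    | succ t =>
      have hstep : ((a :: List.scanl (· + ·) (a + c) cs).getD (t+1) 0) = (List.scanl (· + ·) (a + c) cs).getD t 0 := rfl
      rw [hstep, ih (a + c) t (by simpa using h)]
      simp [List.take_succ_cons]
      ring

lemma pvGetDmapFst (l : List (Char × Int)) (t : Nat) (h : t < l.length) :
    (l.getD t (' ',0)).1 = (l.map (·.1)).getD t ' ' := by
  rw [List.getD_eq_getElem?_getD, List.getD_eq_getElem?_getD, List.getElem?_eq_getElem h,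
    List.getElem?_eq_getElem (by simpa using h)]
  simp

-- the right-to-left last-seen-dict loop computes pvFirst-based next indices
lemma pvNxtLoop (runs : List (Char × Int)) :
    ∀ (t : Nat) (st : List Int × PySem.Dict Char Int),
      t ≤ runs.length →
      st.1.length = runs.length →
      (∀ i', i' < runs.length → t ≤ i' →
        st.1.getD i' (-1) = pvFirst (runs.map (·.1)) ((runs.map (·.1)).getD i' ' ') (i'+1)) →
      (∀ i', i' < runs.length → i' < t → st.1.getD i' (-1) = -1) →
      (∀ c, (if st.2.contains c then st.2.getD c (-1) else -1) = pvFirst (runs.map (·.1)) c t) →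
      ((PySem.List.pyRange ((t:Int)-1) (-1) (-1)).foldl
        (fun (st : List Int × PySem.Dict Char Int) i =>
          let ch := (runs.getD i.toNat (' ', 0)).1
          let nxt := if st.2.contains ch then st.1.set i.toNat (st.2.getD ch (-1)) else st.1
          (nxt, st.2.insert ch i)) st).1.length = runs.length ∧
      (∀ i', i' < runs.length →
        ((PySem.List.pyRange ((t:Int)-1) (-1) (-1)).foldl
          (fun (st : List Int × PySem.Dict Char Int) i =>
            let ch := (runs.getD i.toNat (' ', 0)).1
            let nxt := if st.2.contains ch then st.1.set i.toNat (st.2.getD ch (-1)) else st.1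
            (nxt, st.2.insert ch i)) st).1.getD i' (-1)
          = pvFirst (runs.map (·.1)) ((runs.map (·.1)).getD i' ' ') (i'+1)) := by
  intro t
  induction t with
  | zero =>
    intro st ht hlen hup hdown hlast
    rw [show ((0:Nat):Int) - 1 = -1 by ring, PySem.List.pyRange_neg_one_eq_nil (by omega)]
    exact ⟨hlen, fun i' hi' => hup i' hi' (by omega)⟩
  | succ t ih =>
    intro st ht hlen hup hdown hlast
    have htlen : t < runs.length := by omega
    have hclen : (runs.map (·.1)).length = runs.length := by simp
    have h1 : ((t+1:Nat):Int) - 1 = ((t:Nat):Int) := by push_cast; ring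
    rw [h1, PySem.List.pyRange_neg_one_cons (by omega : (-1:Int) < ((t:Nat):Int)), List.foldl_cons]
    have hch : (runs.getD t (' ',0)).1 = (runs.map (·.1)).getD t ' ' :=
      pvGetDmapFst runs t htlen
    have hct : (runs.map (·.1))[t]'(by omega) = (runs.map (·.1)).getD t ' ' :=
      (List.getD_eq_getElem (runs.map (·.1)) ' ' (by omega)).symm
    have hpf_t : pvFirst (runs.map (·.1)) ((runs.map (·.1)).getD t ' ') t = ((t:Nat):Int) := by
      rw [pvFirst, dif_pos (by omega : t < (runs.map (·.1)).length), if_pos hct]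
    have hpf_skip : ∀ c, c ≠ (runs.map (·.1)).getD t ' ' →
        pvFirst (runs.map (·.1)) c t = pvFirst (runs.map (·.1)) c (t+1) := by
      intro c hc
      conv_lhs => rw [pvFirst]
      rw [dif_pos (by omega : t < (runs.map (·.1)).length),
        if_neg (by rw [hct]; exact fun h => hc h.symm)]
    refine ih _ (by omega) ?_ ?_ ?_ ?_
    · -- length preserved
      simp only [Int.toNat_natCast, hch]
      by_cases hcont : st.2.contains ((runs.map (·.1)).getD t ' ')
      · rw [if_pos hcont]; simpa using hlen
      · rw [if_neg hcont]; exact hlen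
    · -- entries ≥ t correct
      intro i' hi' hti'
      simp only [Int.toNat_natCast, hch]
      by_cases hcont : st.2.contains ((runs.map (·.1)).getD t ' ')
      · rw [if_pos hcont]
        by_cases hit : i' = t
        · subst hit
          rw [pvGetDset_self _ _ _ _ (by omega)]
          have := hlast ((runs.map (·.1)).getD i' ' ')
          rw [if_pos hcont] at this
          exact this
        · rw [pvGetDset_ne _ _ _ _ _ (fun h => hit h.symm)]
          exact hup i' hi' (by omega)
      · rw [if_neg hcont]
        by_cases hit : i' = t
        · subst hit
          have h2 := hlast ((runs.map (·.1)).getD i' ' ')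
          rw [if_neg hcont] at h2
          rw [hdown i' hi' (by omega), h2]
        · exact hup i' hi' (by omega)
    · -- entries < t still -1
      intro i' hi' hit
      simp only [Int.toNat_natCast, hch]
      by_cases hcont : st.2.contains ((runs.map (·.1)).getD t ' ')
      · rw [if_pos hcont, pvGetDset_ne _ _ _ _ _ (by omega)]
        exact hdown i' hi' (by omega)
      · rw [if_neg hcont]
        exact hdown i' hi' (by omega)
    · -- dict invariant at level t
      intro c
      simp only [Int.toNat_natCast, hch]
      by_cases hceq : c = (runs.map (·.1)).getD t ' '
      · subst hceq
        rw [if_pos (by rw [PySem.Dict.contains_insert]; simp),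
          PySem.Dict.getD_insert_self]
        exact hpf_t.symm
      · have hcc : (st.2.insert ((runs.map (·.1)).getD t ' ') ((t:Nat):Int)).contains c = st.2.contains c := by
          rw [PySem.Dict.contains_insert, beq_eq_false_iff_ne.mpr hceq, Bool.false_or]
        rw [hcc, hpf_skip c hceq]
        by_cases hcont : st.2.contains c
        · rw [if_pos hcont, PySem.Dict.getD_insert_of_ne _ _ _ hceq]
          have := hlast c
          rw [if_pos hcont] at this
          exact this
        · rw [if_neg hcont]
          have := hlast c
          rw [if_neg hcont] at this
          exact this

lemma pvSliceSum (freq : List Int) (a b : Nat) (hab : a ≤ b) :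
    ((freq.drop a).take (b - a)).sum = (freq.take b).sum - (freq.take a).sum := by
  have h : freq.take b = freq.take a ++ (freq.drop a).take (b - a) := by
    conv_lhs => rw [show b = a + (b - a) by omega]
    rw [List.take_add]
  rw [h, List.sum_append]
  ring

-- B's f walks the chain reading filled dp rows: it computes the canonical value
lemma pvFB_correct (freq : List Int) (chars : List Char) (prefx nxt : List Int)
    (dp : List (List Int)) (K lo : Nat)
    (hlen : chars.length = freq.length) (hpos : ∀ x ∈ freq, 1 ≤ x)
    (hprefx : ∀ t, t ≤ freq.length → prefx.getD t 0 = (freq.take t).sum)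
    (hnxt : ∀ i', i' < freq.length → nxt.getD i' (-1) = pvNext chars i')
    (hdp : ∀ i' j', lo < i' → i' ≤ freq.length → j' ≤ K →
        (dp.getD i' []).getD j' 0 = pvHc freq chars i' j' 0) :
    ∀ fuel i j (carry : Int), lo ≤ i → i < freq.length → j ≤ K → 0 ≤ carry →
      freq.length - i < fuel →
      pvFB freq prefx nxt dp fuel i j carry = pvHc freq chars i j carry := by
  intro fuel
  induction fuel with
  | zero => intro i j carry _ _ _ _ h; omega
  | succ fuel ih =>
    intro i j carry hlo him hj hc0 hfuel
    rw [pvHc_eq_body freq chars hlen i j carry him]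
    simp only [pvFB, pvBody, pvCostB]
    set curr := carry + freq.getD i 0 with hcurr
    have hcurrpos : 0 < curr := by
      have hmem : freq.getD i 0 = freq[i] := List.getD_eq_getElem freq 0 him
      have := hpos freq[i] (List.getElem_mem him)
      omega
    have hdp1 : (dp.getD (i+1) []).getD j 0 = pvHc freq chars (i+1) j 0 :=
      hdp (i+1) j (by omega) (by omega) hj
    rw [hdp1]
    have hfold : ∀ (best : Int),
        List.foldl (fun best (lc : Int × Int) =>
          if curr > lc.1 ∧ (j:Int) ≥ curr - lc.1 then
            min best (lc.2 + (dp.getD (i+1) []).getD (((j:Int) - (curr - lc.1)).toNat) 0)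
          else best) best [((0:Int),(0:Int)),(1,1),(9,2),(99,3)]
        = List.foldl (fun mn (lc : Int × Int) =>
          if curr > lc.1 ∧ (j:Int) ≥ curr - lc.1 then
            min mn (lc.2 + pvHc freq chars (i+1) (((j:Int) + lc.1 - curr).toNat) 0)
          else mn) best [((0:Int),(0:Int)),(1,1),(9,2),(99,3)] := by
      intro best
      refine PySem.List.foldl_congr_mem _ _ _ _ ?_
      intro acc lc _
      by_cases hg : curr > lc.1 ∧ (j:Int) ≥ curr - lc.1
      · rw [if_pos hg, if_pos hg]
        have harg : ((j:Int) - (curr - lc.1)).toNat = ((j:Int) + lc.1 - curr).toNat := by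
          congr 1; ring
        rw [harg, hdp (i+1) (((j:Int) + lc.1 - curr).toNat) (by omega) (by omega) (by omega)]
      · rw [if_neg hg, if_neg hg]
    rw [hfold]
    rw [hnxt i him]
    by_cases hnx : pvNext chars i = -1
    · rw [if_neg (by simp [hnx]), if_neg (by rw [hnx]; simp)]
    · rcases pvNext_bounds chars i (by omega) with hb | ⟨hb1, hb2, hb3⟩
      · exact absurd hb hnx
      · have hposx : pvNext chars i > 0 := (pvNext_pos_iff chars i (by omega)).mpr hnx
        have hdeleq : prefx.getD (pvNext chars i).toNat 0 - prefx.getD (i+1) 0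
            = (PySem.List.slice freq (some ((i:Int)+1)) (some (pvNext chars i))).sum := by
          rw [PySem.List.slice_toNat freq (by omega) (by omega)]
          have ht1 : ((i:Int)+1).toNat = i + 1 := by omega
          rw [ht1, hprefx (pvNext chars i).toNat (by omega), hprefx (i+1) (by omega),
            pvSliceSum freq (i+1) (pvNext chars i).toNat (by omega)]
        have hdel0 : 0 ≤ (PySem.List.slice freq (some ((i:Int)+1)) (some (pvNext chars i))).sum := by
          refine List.sum_nonneg (fun x hx => ?_)
          have := hpos x (PySem.List.mem_of_mem_slice freq _ _ hx)
          omega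
        rw [if_pos hnx, hdeleq]
        by_cases hjd : (j:Int) ≥ (PySem.List.slice freq (some ((i:Int)+1)) (some (pvNext chars i))).sum
        · rw [if_pos hjd, if_pos ⟨hposx, hjd⟩]
          rw [ih (pvNext chars i).toNat (((j:Int) - (PySem.List.slice freq (some ((i:Int)+1)) (some (pvNext chars i))).sum).toNat)
            curr (by omega) (by omega) (by omega) (by omega) (by omega)]
        · rw [if_neg hjd, if_neg (fun hh => hjd hh.2)]

-- one row of the bottom-up table: the j-loop fills row i with canonical values
lemma pvDpRow (freq : List Int) (chars : List Char) (prefx nxt : List Int) (K i : Nat)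
    (hlen : chars.length = freq.length) (hpos : ∀ x ∈ freq, 1 ≤ x)
    (hprefx : ∀ t, t ≤ freq.length → prefx.getD t 0 = (freq.take t).sum)
    (hnxt : ∀ i', i' < freq.length → nxt.getD i' (-1) = pvNext chars i')
    (hi : i < freq.length) :
    ∀ (J : Nat) (dp : List (List Int)),
      dp.length = freq.length + 1 →
      (∀ r ∈ dp, r.length = K + 1) →
      (∀ i' j', i < i' → i' ≤ freq.length → j' ≤ K → (dp.getD i' []).getD j' 0 = pvHc freq chars i' j' 0) →
      J ≤ K + 1 →
      (((PySem.List.pyRange 0 (J:Int) 1).foldl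
        (fun dp j => dp.set i ((dp.getD i []).set j.toNat (pvFB freq prefx nxt dp (freq.length+1) i j.toNat 0))) dp).length = freq.length + 1) ∧
      (∀ r ∈ ((PySem.List.pyRange 0 (J:Int) 1).foldl
        (fun dp j => dp.set i ((dp.getD i []).set j.toNat (pvFB freq prefx nxt dp (freq.length+1) i j.toNat 0))) dp), r.length = K + 1) ∧
      (∀ i', i' ≠ i → ((PySem.List.pyRange 0 (J:Int) 1).foldl
        (fun dp j => dp.set i ((dp.getD i []).set j.toNat (pvFB freq prefx nxt dp (freq.length+1) i j.toNat 0))) dp).getD i' [] = dp.getD i' []) ∧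
      (∀ j', j' < J → (((PySem.List.pyRange 0 (J:Int) 1).foldl
        (fun dp j => dp.set i ((dp.getD i []).set j.toNat (pvFB freq prefx nxt dp (freq.length+1) i j.toNat 0))) dp).getD i []).getD j' 0 = pvHc freq chars i j' 0) := by
  intro J
  induction J with
  | zero =>
    intro dp h1 h2 h3 h4
    rw [show ((0:Nat):Int) = 0 by rfl, PySem.List.pyRange_one_eq_nil (by omega)]
    exact ⟨h1, h2, fun _ _ => rfl, fun j' hj' => by omega⟩
  | succ J ihJ =>
    intro dp h1 h2 h3 h4
    obtain ⟨g1, g2, g3, g4⟩ := ihJ dp h1 h2 h3 (by omega)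
    have hcast : ((J+1:Nat):Int) = ((J:Nat):Int) + 1 := by push_cast; ring
    rw [hcast, PySem.List.pyRange_one_succ_right (by omega), List.foldl_append, List.foldl_cons, List.foldl_nil]
    set res := (PySem.List.pyRange 0 ((J:Nat):Int) 1).foldl
        (fun dp j => dp.set i ((dp.getD i []).set j.toNat (pvFB freq prefx nxt dp (freq.length+1) i j.toNat 0))) dp with hres
    have hrowlen : (res.getD i []).length = K + 1 := by
      have hiL : i < res.length := by omega
      have : res.getD i [] = res[i] := by
        simp [List.getD_eq_getElem?_getD, List.getElem?_eq_getElem hiL]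
      rw [this]
      exact g2 _ (List.getElem_mem hiL)
    have hv : pvFB freq prefx nxt res (freq.length+1) i J 0 = pvHc freq chars i J 0 := by
      refine pvFB_correct freq chars prefx nxt res K i hlen hpos hprefx hnxt
        (fun i' j' hii' hi' hj' => by rw [g3 i' (by omega)]; exact h3 i' j' hii' hi' hj')
        (freq.length+1) i J 0 (le_refl i) hi (by omega) (by omega) (by omega)
    refine ⟨by simpa using g1, ?_, ?_, ?_⟩
    · intro r hr
      rcases List.mem_or_eq_of_mem_set hr with h | h
      · exact g2 r h
      · rw [h, List.length_set]
        exact hrowlen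
    · intro i' hii'
      rw [pvGetDset_ne _ _ _ _ _ (fun h => hii' h.symm)]
      exact g3 i' hii'
    · intro j' hj'
      rw [pvGetDset_self _ _ _ _ (by omega)]
      simp only [Int.toNat_natCast]
      by_cases hjJ : j' = J
      · rw [hjJ, pvGetDset_self _ _ _ _ (by omega), hv]
      · rw [pvGetDset_ne _ _ _ _ _ (fun h => hjJ h.symm)]
        exact g4 j' (by omega)

-- the outer countdown loop fills every row
lemma pvDpLoop (freq : List Int) (chars : List Char) (prefx nxt : List Int) (K : Nat)
    (hlen : chars.length = freq.length) (hpos : ∀ x ∈ freq, 1 ≤ x)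
    (hprefx : ∀ t, t ≤ freq.length → prefx.getD t 0 = (freq.take t).sum)
    (hnxt : ∀ i', i' < freq.length → nxt.getD i' (-1) = pvNext chars i') :
    ∀ (t : Nat) (dp : List (List Int)),
      t ≤ freq.length →
      dp.length = freq.length + 1 →
      (∀ r ∈ dp, r.length = K + 1) →
      (∀ i' j', t ≤ i' → i' ≤ freq.length → j' ≤ K → (dp.getD i' []).getD j' 0 = pvHc freq chars i' j' 0) →
      (∀ i' j', i' ≤ freq.length → j' ≤ K →
        (((PySem.List.pyRange ((t:Int)-1) (-1) (-1)).foldl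
          (fun dp i => (PySem.List.pyRange 0 ((K:Int)+1) 1).foldl
            (fun dp j => dp.set i.toNat ((dp.getD i.toNat []).set j.toNat (pvFB freq prefx nxt dp (freq.length+1) i.toNat j.toNat 0))) dp) dp).getD i' []).getD j' 0
          = pvHc freq chars i' j' 0) := by
  intro t
  induction t with
  | zero =>
    intro dp ht h1 h2 h3 i' j' hi' hj'
    rw [show ((0:Nat):Int) - 1 = -1 by ring, PySem.List.pyRange_neg_one_eq_nil (by omega)]
    exact h3 i' j' (by omega) hi' hj'
  | succ t ih =>
    intro dp ht h1 h2 h3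
    have h1' : ((t+1:Nat):Int) - 1 = ((t:Nat):Int) := by push_cast; ring
    rw [h1', PySem.List.pyRange_neg_one_cons (by omega : (-1:Int) < ((t:Nat):Int)), List.foldl_cons]
    have hKcast : ((K:Int)+1) = ((K+1:Nat):Int) := by push_cast; ring
    have hrow := pvDpRow freq chars prefx nxt K t hlen hpos hprefx hnxt (by omega) (K+1)
      dp h1 h2 (fun i' j' hii' hi' hj' => h3 i' j' (by omega) hi' hj') (le_refl _)
    obtain ⟨g1, g2, g3, g4⟩ := hrow
    intro i' j' hi' hj'
    have hstep : List.foldl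
            (fun (dp : List (List Int)) (j : Int) => dp.set (((t:Nat):Int)).toNat ((dp.getD (((t:Nat):Int)).toNat []).set j.toNat (pvFB freq prefx nxt dp (freq.length+1) (((t:Nat):Int)).toNat j.toNat 0)))
            dp (PySem.List.pyRange 0 ((K:Int)+1) 1)
        = List.foldl
            (fun dp j => dp.set t ((dp.getD t []).set j.toNat (pvFB freq prefx nxt dp (freq.length+1) t j.toNat 0)))
            dp (PySem.List.pyRange 0 ((K+1:Nat):Int) 1) := by
      simp only [Int.toNat_natCast, hKcast]
    rw [hstep]
    refine ih _ (by omega) (by simpa using g1) g2 ?_ i' j' hi' hj'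
    intro i2 j2 hti2 hi2 hj2
    by_cases hit : i2 = t
    · subst hit
      exact g4 j2 (by omega)
    · rw [g3 i2 hit]
      exact h3 i2 j2 (by omega) hi2 hj2

lemma pvFreqPos (s : String) : ∀ x ∈ (pvRunsB s.toList).map (·.2), 1 ≤ x := by
  intro x hx
  rcases List.mem_map.mp hx with ⟨y, hy, hyx⟩
  rw [← hyx]
  exact pvRuns_pos s.toList y hy

lemma pvA_final (s : String) (k : Int) (hk : 0 ≤ k) :
    getLengthOfOptimalCompression s k
      = pvHc ((pvRunsB s.toList).map (·.2)) ((pvRunsB s.toList).map (·.1)) 0 k.toNat 0 := by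
  unfold getLengthOfOptimalCompression
  simp only [pvRLE_fold s.toList]
  set freq := (pvRunsB s.toList).map (·.2) with hfreq
  set chars := (pvRunsB s.toList).map (·.1) with hchars
  have hK1 : (k+1).toNat = k.toNat + 1 := by omega
  set mem0 := List.replicate freq.length (List.replicate (k+1).toNat (-1:Int)) ++ [List.replicate (k+1).toNat (0:Int)] with hmem0
  have hInv : pvInv freq chars k.toNat mem0 := by
    refine ⟨by simp [hmem0], ?_, ?_, ?_⟩
    · intro r hr
      rcases List.mem_append.mp hr with h | h
      · rw [List.eq_of_mem_replicate h, List.length_replicate, hK1]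
      · rw [List.mem_singleton.mp h, List.length_replicate, hK1]
    · intro j hj
      have hrow : mem0.getD freq.length [] = List.replicate (k+1).toNat (0:Int) := by
        rw [hmem0, List.getD_eq_getElem?_getD,
          List.getElem?_append_right (by rw [List.length_replicate])]
        rw [List.length_replicate, Nat.sub_self]
        rfl
      rw [hrow, List.getD_replicate _ (by omega)]
    · intro i j hi hj
      by_cases him : i < freq.length
      · left
        have hrow : mem0.getD i [] = List.replicate (k+1).toNat (-1:Int) := by
          rw [hmem0, List.getD_eq_getElem?_getD,
            List.getElem?_append_left (by rw [List.length_replicate]; omega),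
            List.getElem?_replicate_of_lt him]
          rfl
        rw [hrow, List.getD_replicate _ (by omega)]
      · right
        have hie : i = freq.length := by omega
        have hrow : mem0.getD i [] = List.replicate (k+1).toNat (0:Int) := by
          rw [hie, hmem0, List.getD_eq_getElem?_getD,
            List.getElem?_append_right (by rw [List.length_replicate])]
          rw [List.length_replicate, Nat.sub_self]
          rfl
        rw [hrow, List.getD_replicate _ (by omega), pvHc_base _ _ _ _ _ (by omega)]
  exact (pvHelperA_correct freq chars (by simp [hchars, hfreq]) (pvFreqPos s) k.toNat
    (freq.length + 2) 0 k.toNat 0 mem0 hInv (by omega) (le_refl _) (le_refl 0)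
    (fun h => absurd h (by omega)) (by omega)).1

lemma pvB_final (s : String) (k : Int) (hk : 0 ≤ k) :
    getLengthOfOptimalCompression_alt s k
      = pvHc ((pvRunsB s.toList).map (·.2)) ((pvRunsB s.toList).map (·.1)) 0 k.toNat 0 := by
  unfold getLengthOfOptimalCompression_alt
  set runs := pvRunsB s.toList with hruns
  set freq := runs.map (·.2) with hfreq
  set chars := runs.map (·.1) with hchars
  have hm : chars.length = runs.length := by simp [hchars]
  have hmf : freq.length = runs.length := by simp [hfreq]
  have hlen : chars.length = freq.length := by rw [hm, hmf]
  have hprefx : ∀ t, t ≤ freq.length →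
      (freq.foldl (fun p c => p ++ [p.getLastD 0 + c]) [(0:Int)]).getD t 0 = (freq.take t).sum := by
    intro t ht
    have h0 : [(0:Int)] = ([] : List Int) ++ [0] := rfl
    rw [h0, pvPrefix_fold freq [] 0, List.nil_append, pvScanl_getD freq 0 t ht, zero_add]
  have hpfm : ∀ c, pvFirst chars c runs.length = -1 := by
    intro c
    rw [pvFirst, dif_neg (by omega)]
  obtain ⟨hnlen, hnval⟩ := pvNxtLoop runs runs.length
    (List.replicate runs.length (-1), PySem.Dict.empty) (le_refl _)
    (by simp)
    (fun i' h1 h2 => by omega)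
    (fun i' h1 _ => List.getD_replicate _ h1)
    (fun c => by
      rw [if_neg (by rw [PySem.Dict.contains_empty]; simp), hpfm c])
  have hnxt : ∀ i', i' < freq.length →
      ((PySem.List.pyRange ((runs.length:Int)-1) (-1) (-1)).foldl
        (fun (st : List Int × PySem.Dict Char Int) i =>
          let ch := (runs.getD i.toNat (' ', 0)).1
          let nxt := if st.2.contains ch then st.1.set i.toNat (st.2.getD ch (-1)) else st.1
          (nxt, st.2.insert ch i)) (List.replicate runs.length (-1), PySem.Dict.empty)).1.getD i' (-1)
        = pvNext chars i' := by
    intro i' hi'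
    rw [hnval i' (by omega), pvNext_eq_pvFirst chars i' (by omega)]
  -- align lengths and the k-cast, then run the dp-loop lemma
  have hk1 : (k+1 : Int) = ((k.toNat + 1 : Nat) : Int) := by omega
  have hK1 : (k+1).toNat = k.toNat + 1 := by omega
  have hkK : ((k.toNat : Nat) : Int) + 1 = (k+1 : Int) := by omega
  have hdp0len : (List.replicate (runs.length+1) (List.replicate (k+1).toNat (0:Int))).length = freq.length + 1 := by
    rw [List.length_replicate, hmf]
  have hdp0rows : ∀ r ∈ List.replicate (runs.length+1) (List.replicate (k+1).toNat (0:Int)), r.length = k.toNat + 1 := by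
    intro r hr
    rw [List.eq_of_mem_replicate hr, List.length_replicate, hK1]
  have hdp0good : ∀ i' j', freq.length ≤ i' → i' ≤ freq.length → j' ≤ k.toNat →
      ((List.replicate (runs.length+1) (List.replicate (k+1).toNat (0:Int))).getD i' []).getD j' 0
        = pvHc freq chars i' j' 0 := by
    intro i' j' h1 h2 h3
    rw [List.getD_replicate _ (by omega), List.getD_replicate _ (by omega),
      pvHc_base _ _ _ _ _ (by omega)]
  have hloop := pvDpLoop freq chars
    (freq.foldl (fun p c => p ++ [p.getLastD 0 + c]) [(0:Int)])
    ((PySem.List.pyRange ((runs.length:Int)-1) (-1) (-1)).foldl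
        (fun (st : List Int × PySem.Dict Char Int) i =>
          let ch := (runs.getD i.toNat (' ', 0)).1
          let nxt := if st.2.contains ch then st.1.set i.toNat (st.2.getD ch (-1)) else st.1
          (nxt, st.2.insert ch i)) (List.replicate runs.length (-1), PySem.Dict.empty)).1
    k.toNat hlen (by rw [hfreq]; exact pvFreqPos s) hprefx hnxt freq.length
    (List.replicate (runs.length+1) (List.replicate (k+1).toNat (0:Int)))
    (le_refl _) hdp0len hdp0rows hdp0good 0 k.toNat (by omega) (le_refl _)
  rw [hmf] at hloop
  rw [show ((k.toNat : Nat) : Int) = k from by omega] at hloop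
  exact hloop

-- ===== VERDICT (by name: the statement is the Claim_ definition above) =====
theorem getLengthOfOptimalCompression_spec : Claim_equal_getLengthOfOptimalCompression := by
  intro s k _ hk
  unfold Spec_getLengthOfOptimalCompression
  rw [pvA_final s k hk, pvB_final s k hk]
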